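-- pv_equiv track=rewrite | github.com/joqjoq966/Algorithm_python | Codeforces/global_round_13/d.py | solve
-- ===== SOURCE A (Python) =====
-- def solve(u,v):
--
--     a = []
--     b = []
--     for bit in range(30):
--         if u & (1<<bit):
--             a.append(bit)
--         if v & (1<<bit):
--             b.append(bit)
--
--     ans = True
--
--     if len(a) < len(b):
--         ans = False
--     else:
--         for i in range(len(b)):
--             if a[i] > b[i]:
--                 ans = False
--     ans &= (u<=v)
--     if ans ==True:
--         return "YES"
--     else:
--         return "NO"
-- ===== SOURCE B (Python) =====
-- def solve(u, v):
--     cu = cv = 0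
--     ok = True
--     for bit in range(30):
--         if u & (1 << bit):
--             cu += 1
--         if v & (1 << bit):
--             cv += 1
--         if cv > cu:
--             ok = False
--     return "YES" if ok and u <= v else "NO"
-- ===== Notes on version B (the rewrite author's own statement) =====
-- stated objective: simpler
-- what changed: Replaces A's two set-bit-position lists and the indexed elementwise comparison loop (plus separate length check) by a single pass over bits 0..29 that maintains running set-bit counts and flags failure whenever v's prefix count exceeds u's (the equivalent prefix-count majorization condition).
import Mathlib
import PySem

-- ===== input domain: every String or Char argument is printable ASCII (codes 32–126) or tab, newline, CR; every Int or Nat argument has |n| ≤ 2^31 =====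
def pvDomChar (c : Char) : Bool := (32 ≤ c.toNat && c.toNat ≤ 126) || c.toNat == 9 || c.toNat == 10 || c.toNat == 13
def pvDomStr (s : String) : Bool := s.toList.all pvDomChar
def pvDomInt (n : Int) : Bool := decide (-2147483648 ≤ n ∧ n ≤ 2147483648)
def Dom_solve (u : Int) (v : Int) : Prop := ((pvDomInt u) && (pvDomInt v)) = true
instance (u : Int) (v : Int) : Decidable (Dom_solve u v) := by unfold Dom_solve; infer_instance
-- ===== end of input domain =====

-- B replaces A's two set-bit-position lists and the indexed comparison loop by a single
-- pass maintaining running set-bit counts (prefix-count majorization); objective: simpler.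

-- ===== PORT A =====
-- literal port of A: build lists a,b of set-bit positions over bits 0..29, then compare
-- elementwise; 'bit.toNat' is exact since pyRange 0 30 yields only nonnegative bits;
-- pyGetD's default 0 is never used: i < len(b) ≤ len(a) in the branch where the loop runs.
def solve (u : Int) (v : Int) : String :=
  let ab := (PySem.List.pyRange 0 30).foldl
    (fun (s : List Int × List Int) bit =>
      let s := if PySem.Int.band u (1 <<< bit.toNat) ≠ 0 then (s.1 ++ [bit], s.2) else s
      if PySem.Int.band v (1 <<< bit.toNat) ≠ 0 then (s.1, s.2 ++ [bit]) else s)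
    ([], [])
  let a := ab.1
  let b := ab.2
  let ans :=
    if a.length < b.length then false
    else (PySem.List.pyRange 0 (b.length : Int)).foldl
      (fun ans i => if PySem.List.pyGetD a i 0 > PySem.List.pyGetD b i 0 then false else ans)
      true
  let ans := ans && decide (u ≤ v)
  if ans = true then "YES" else "NO"

-- ===== PORT B =====
-- literal port of Source B: one pass over bits 0..29 maintaining counts cu, cv and a flag ok.
def solve_alt (u : Int) (v : Int) : String :=
  let st := (PySem.List.pyRange 0 30).foldl
    (fun (s : Int × Int × Bool) bit =>
      let cu := if PySem.Int.band u (1 <<< bit.toNat) ≠ 0 then s.1 + 1 else s.1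
      let cv := if PySem.Int.band v (1 <<< bit.toNat) ≠ 0 then s.2.1 + 1 else s.2.1
      let ok := if cv > cu then false else s.2.2
      (cu, cv, ok))
    (0, 0, true)
  if st.2.2 && decide (u ≤ v) then "YES" else "NO"

-- ===== PRECONDITION & SPEC =====
def Spec_solve (u : Int) (v : Int) (out : String) : Prop := out = solve_alt u v
instance (u : Int) (v : Int) (out : String) : Decidable (Spec_solve u v out) := by unfold Spec_solve; infer_instance

-- ===== CLAIM (what is proved, stated in full; the proofs are below) =====
def Claim_equal_solve : Prop := ∀ (u : Int) (v : Int), Dom_solve u v → Spec_solve u v (solve u v)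

-- ===== LEMMAS AND PROOFS =====

-- the k-th bit of w, as the truthiness of Python's 'w & (1 << k)'
def pvBit (w : Int) (k : ℕ) : Bool := decide (PySem.Int.band w ((1 <<< k : ℕ) : Int) ≠ 0)
-- positions of the set bits among bits 0..n-1, in increasing order
def pvBits (w : Int) (n : ℕ) : List ℕ := (List.range n).filter (pvBit w)
-- number of set bits among bits 0..n-1
def pvCnt (w : Int) (n : ℕ) : ℕ := (pvBits w n).length

lemma pvBits_succ (w : Int) (n : ℕ) :
    pvBits w (n+1) = pvBits w n ++ if pvBit w n then [n] else [] := by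
  simp [pvBits, List.range_succ, List.filter_append, List.filter_singleton]

lemma pvCnt_succ (w : Int) (n : ℕ) :
    pvCnt w (n+1) = pvCnt w n + if pvBit w n then 1 else 0 := by
  simp [pvCnt, pvBits_succ]; split <;> simp

lemma pvBits_lt (w : Int) (n : ℕ) : ∀ x ∈ pvBits w n, x < n := by
  intro x hx
  exact List.mem_range.mp (List.mem_filter.mp hx).1

lemma pvBits_length (w : Int) (n : ℕ) : (pvBits w n).length = pvCnt w n := rfl

lemma pvBits_getD_lt (w : Int) (n i : ℕ) (hi : i < pvCnt w n) : (pvBits w n).getD i 0 < n := by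
  rw [List.getD_eq_getElem _ _ hi]
  exact pvBits_lt w n _ (List.getElem_mem hi)

-- A's first loop builds the two set-bit-position lists
lemma foldA (u v : Int) (n : ℕ) :
    (PySem.List.pyRange 0 (n : Int)).foldl
      (fun (s : List Int × List Int) bit =>
        let s := if PySem.Int.band u (1 <<< bit.toNat) ≠ 0 then (s.1 ++ [bit], s.2) else s
        if PySem.Int.band v (1 <<< bit.toNat) ≠ 0 then (s.1, s.2 ++ [bit]) else s)
      ([], [])
    = ((pvBits u n).map Int.ofNat, (pvBits v n).map Int.ofNat) := by
  induction n with
  | zero => simp [pvBits, PySem.List.pyRange]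
  | succ n ih =>
    have hr : PySem.List.pyRange 0 ((n+1 : ℕ) : Int) = PySem.List.pyRange 0 (n : Int) ++ [(n : Int)] := by
      push_cast
      exact PySem.List.pyRange_one_succ_right (by positivity)
    rw [hr, List.foldl_append, ih]
    simp only [List.foldl_cons, List.foldl_nil, Int.toNat_natCast, pvBits_succ, List.map_append]
    by_cases h1 : pvBit u n <;> by_cases h2 : pvBit v n <;>
      simp [pvBit] at h1 h2 <;> simp [pvBit, h1, h2]

-- B's loop computes the two running counts and the prefix-domination flag
lemma foldB (u v : Int) (n : ℕ) :
    (PySem.List.pyRange 0 (n : Int)).foldl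
      (fun (s : Int × Int × Bool) bit =>
        let cu := if PySem.Int.band u (1 <<< bit.toNat) ≠ 0 then s.1 + 1 else s.1
        let cv := if PySem.Int.band v (1 <<< bit.toNat) ≠ 0 then s.2.1 + 1 else s.2.1
        let ok := if cv > cu then false else s.2.2
        (cu, cv, ok))
      (0, 0, true)
    = ((pvCnt u n : Int), (pvCnt v n : Int),
       decide (∀ m < n, pvCnt v (m+1) ≤ pvCnt u (m+1))) := by
  induction n with
  | zero => simp [pvCnt, pvBits, PySem.List.pyRange]
  | succ n ih =>
    have hr : PySem.List.pyRange 0 ((n+1 : ℕ) : Int) = PySem.List.pyRange 0 (n : Int) ++ [(n : Int)] := by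
      push_cast
      exact PySem.List.pyRange_one_succ_right (by positivity)
    rw [hr, List.foldl_append, ih]
    simp only [List.foldl_cons, List.foldl_nil, Int.toNat_natCast]
    have hcu : (if PySem.Int.band u ((1 <<< n : ℕ) : Int) ≠ 0 then (pvCnt u n : Int) + 1 else (pvCnt u n : Int))
        = (pvCnt u (n+1) : Int) := by
      rw [pvCnt_succ]
      by_cases h : pvBit u n <;> simp [pvBit] at h <;> simp [pvBit, h]
    have hcv : (if PySem.Int.band v ((1 <<< n : ℕ) : Int) ≠ 0 then (pvCnt v n : Int) + 1 else (pvCnt v n : Int))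
        = (pvCnt v (n+1) : Int) := by
      rw [pvCnt_succ]
      by_cases h : pvBit v n <;> simp [pvBit] at h <;> simp [pvBit, h]
    rw [hcu, hcv]
    have hok : (if ((pvCnt v (n+1) : Int) > (pvCnt u (n+1) : Int)) then false
          else decide (∀ m < n, pvCnt v (m+1) ≤ pvCnt u (m+1)))
        = decide (∀ m < n+1, pvCnt v (m+1) ≤ pvCnt u (m+1)) := by
      by_cases hlt : (pvCnt v (n+1) : Int) > (pvCnt u (n+1) : Int)
      · rw [if_pos hlt]
        symm
        simp only [decide_eq_false_iff_not]
        intro hall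
        have h2 := hall n (Nat.lt_succ_self n)
        omega
      · rw [if_neg hlt]
        apply decide_eq_decide.mpr
        constructor
        · intro h m hm
          rcases Nat.lt_succ_iff_lt_or_eq.mp hm with h' | rfl
          · exact h m h'
          · omega
        · intro h m hm
          exact h m (by omega)
    rw [hok]

-- majorization: prefix-count domination ↔ length + index-wise comparison
lemma maj (u v : Int) (n : ℕ) :
    (∀ m ≤ n, pvCnt v m ≤ pvCnt u m) ↔
    (pvCnt v n ≤ pvCnt u n ∧ ∀ i < pvCnt v n, (pvBits u n).getD i 0 ≤ (pvBits v n).getD i 0) := by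
  induction n with
  | zero =>
    simp [pvCnt, pvBits]
  | succ n ih =>
    have hsplit : (∀ m ≤ n+1, pvCnt v m ≤ pvCnt u m) ↔
        ((∀ m ≤ n, pvCnt v m ≤ pvCnt u m) ∧ pvCnt v (n+1) ≤ pvCnt u (n+1)) := by
      constructor
      · exact fun h => ⟨fun m hm => h m (by omega), h (n+1) le_rfl⟩
      · rintro ⟨h1, h2⟩ m hm
        by_cases hm' : m ≤ n
        · exact h1 m hm'
        · have : m = n+1 := by omega
          subst this; exact h2
    rw [hsplit, ih]
    by_cases pu : pvBit u n <;> by_cases pv : pvBit v n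
    · -- pu true, pv true
      have ha : pvBits u (n+1) = pvBits u n ++ [n] := by rw [pvBits_succ, if_pos pu]
      have hb : pvBits v (n+1) = pvBits v n ++ [n] := by rw [pvBits_succ, if_pos pv]
      have hca : pvCnt u (n+1) = pvCnt u n + 1 := by rw [pvCnt_succ, if_pos pu]
      have hcb : pvCnt v (n+1) = pvCnt v n + 1 := by rw [pvCnt_succ, if_pos pv]
      rw [ha, hb, hca, hcb]
      constructor
      · rintro ⟨⟨hlen, hidx⟩, _⟩
        refine ⟨by omega, ?_⟩
        intro i hi
        rcases Nat.lt_succ_iff_lt_or_eq.mp hi with hilt | rfl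
        · rw [List.getD_append _ _ _ _ (by rw [pvBits_length]; omega),
              List.getD_append _ _ _ _ (by rw [pvBits_length]; omega)]
          exact hidx i hilt
        · rw [List.getD_append_right (pvBits v n) [n] 0 (pvCnt v n) (le_of_eq (pvBits_length v n))]
          have hzb : pvCnt v n - (pvBits v n).length = 0 := by rw [pvBits_length]; omega
          rw [hzb, List.getD_cons_zero]
          rcases Nat.lt_or_ge (pvCnt v n) (pvCnt u n) with hlt | hge
          · rw [List.getD_append (pvBits u n) [n] 0 (pvCnt v n) (by rw [pvBits_length]; omega)]
            exact le_of_lt (pvBits_getD_lt u n _ hlt)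
          · rw [List.getD_append_right (pvBits u n) [n] 0 (pvCnt v n) (by rw [pvBits_length]; omega)]
            have hz : pvCnt v n - (pvBits u n).length = 0 := by rw [pvBits_length]; omega
            rw [hz]
            simp
      · rintro ⟨hlen', hidx'⟩
        refine ⟨⟨by omega, ?_⟩, by omega⟩
        intro i hi
        have h := hidx' i (by omega)
        rwa [List.getD_append _ _ _ _ (by rw [pvBits_length]; omega),
             List.getD_append _ _ _ _ (by rw [pvBits_length]; omega)] at h
    · -- pu true, pv false
      have ha : pvBits u (n+1) = pvBits u n ++ [n] := by rw [pvBits_succ, if_pos pu]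
      have hb : pvBits v (n+1) = pvBits v n := by rw [pvBits_succ, if_neg pv]; simp
      have hca : pvCnt u (n+1) = pvCnt u n + 1 := by rw [pvCnt_succ, if_pos pu]
      have hcb : pvCnt v (n+1) = pvCnt v n := by rw [pvCnt_succ, if_neg pv]; simp
      rw [ha, hb, hca, hcb]
      constructor
      · rintro ⟨⟨hlen, hidx⟩, _⟩
        refine ⟨by omega, ?_⟩
        intro i hi
        rw [List.getD_append _ _ _ _ (by rw [pvBits_length]; omega)]
        exact hidx i hi
      · rintro ⟨hlen', hidx'⟩
        have hlen : pvCnt v n ≤ pvCnt u n := by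
          by_contra hgt
          have hi : pvCnt u n < pvCnt v n := by omega
          have h1 := hidx' (pvCnt u n) hi
          rw [List.getD_append_right _ _ _ _ (by rw [pvBits_length])] at h1
          simp only [pvBits_length, Nat.sub_self, List.getD_cons_zero] at h1
          have h2 := pvBits_getD_lt v n (pvCnt u n) hi
          omega
        refine ⟨⟨hlen, ?_⟩, by omega⟩
        intro i hi
        have h := hidx' i hi
        rwa [List.getD_append _ _ _ _ (by rw [pvBits_length]; omega)] at h
    · -- pu false, pv true
      have ha : pvBits u (n+1) = pvBits u n := by rw [pvBits_succ, if_neg pu]; simp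
      have hb : pvBits v (n+1) = pvBits v n ++ [n] := by rw [pvBits_succ, if_pos pv]
      have hca : pvCnt u (n+1) = pvCnt u n := by rw [pvCnt_succ, if_neg pu]; simp
      have hcb : pvCnt v (n+1) = pvCnt v n + 1 := by rw [pvCnt_succ, if_pos pv]
      rw [ha, hb, hca, hcb]
      constructor
      · rintro ⟨⟨hlen, hidx⟩, hC⟩
        refine ⟨hC, ?_⟩
        intro i hi
        rcases Nat.lt_succ_iff_lt_or_eq.mp hi with hilt | rfl
        · rw [List.getD_append _ _ _ _ (by rw [pvBits_length]; omega)]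
          exact hidx i hilt
        · rw [List.getD_append_right _ _ _ _ (by rw [pvBits_length])]
          simp only [pvBits_length, Nat.sub_self, List.getD_cons_zero]
          exact le_of_lt (pvBits_getD_lt u n _ (by omega))
      · rintro ⟨hlen', hidx'⟩
        refine ⟨⟨by omega, ?_⟩, hlen'⟩
        intro i hi
        have h := hidx' i (by omega)
        rwa [List.getD_append _ _ _ _ (by rw [pvBits_length]; omega)] at h
    · -- pu false, pv false
      have ha : pvBits u (n+1) = pvBits u n := by rw [pvBits_succ, if_neg pu]; simp
      have hb : pvBits v (n+1) = pvBits v n := by rw [pvBits_succ, if_neg pv]; simp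
      have hca : pvCnt u (n+1) = pvCnt u n := by rw [pvCnt_succ, if_neg pu]; simp
      have hcb : pvCnt v (n+1) = pvCnt v n := by rw [pvCnt_succ, if_neg pv]; simp
      rw [ha, hb, hca, hcb]
      tauto


-- A's second loop is an 'all indices pass' check
lemma loopA (a b : List Int) (m : ℕ) :
    (PySem.List.pyRange 0 (m : Int)).foldl
      (fun ans i => if PySem.List.pyGetD a i 0 > PySem.List.pyGetD b i 0 then false else ans) true
    = decide (∀ i < m, ¬ (PySem.List.pyGetD a ((i : ℕ) : Int) 0 > PySem.List.pyGetD b ((i : ℕ) : Int) 0)) := by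
  induction m with
  | zero => simp [PySem.List.pyRange]
  | succ m ih =>
    have hr : PySem.List.pyRange 0 ((m+1 : ℕ) : Int) = PySem.List.pyRange 0 (m : Int) ++ [(m : Int)] := by
      push_cast
      exact PySem.List.pyRange_one_succ_right (by positivity)
    rw [hr, List.foldl_append, ih]
    simp only [List.foldl_cons, List.foldl_nil]
    by_cases h : PySem.List.pyGetD a ((m : ℕ) : Int) 0 > PySem.List.pyGetD b ((m : ℕ) : Int) 0
    · rw [if_pos h]
      symm
      simp only [decide_eq_false_iff_not]
      intro hall
      exact (hall m (Nat.lt_succ_self m)) h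
    · rw [if_neg h]
      apply decide_eq_decide.mpr
      constructor
      · intro hh i hi
        rcases Nat.lt_succ_iff_lt_or_eq.mp hi with h' | rfl
        · exact hh i h'
        · exact h
      · intro hh i hi
        exact hh i (by omega)

-- B's flag over the first n bits, as a decidable proposition
def pvOK (u v : Int) (n : ℕ) : Bool := decide (∀ m < n, pvCnt v (m+1) ≤ pvCnt u (m+1))

-- A's result as a decided proposition
lemma solveA_eq (u v : Int) :
    solve u v =
      if (decide (pvCnt v 30 ≤ pvCnt u 30 ∧
            ∀ i < pvCnt v 30, (pvBits u 30).getD i 0 ≤ (pvBits v 30).getD i 0)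
          && decide (u ≤ v)) = true
      then "YES" else "NO" := by
  have h30 : (30 : Int) = ((30 : ℕ) : Int) := by norm_num
  unfold solve
  rw [h30, foldA]
  simp only [List.length_map, pvBits_length]
  rw [loopA]
  have hgetD : ∀ (w : Int) (i : ℕ),
      PySem.List.pyGetD ((pvBits w 30).map Int.ofNat) ((i : ℕ) : Int) 0
        = Int.ofNat ((pvBits w 30).getD i 0) := by
    intro w i
    rw [PySem.List.pyGetD_natCast, show (0:Int) = Int.ofNat 0 from rfl, List.getD_map]
  have hiff : (∀ i < pvCnt v 30,
        ¬ (PySem.List.pyGetD ((pvBits u 30).map Int.ofNat) ((i : ℕ) : Int) 0 >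
           PySem.List.pyGetD ((pvBits v 30).map Int.ofNat) ((i : ℕ) : Int) 0))
      ↔ (∀ i < pvCnt v 30, (pvBits u 30).getD i 0 ≤ (pvBits v 30).getD i 0) := by
    refine forall_congr' fun i => imp_congr_right fun _ => ?_
    rw [hgetD, hgetD]
    constructor
    · intro h
      exact Int.ofNat_le.mp (not_lt.mp h)
    · intro h
      exact not_lt.mpr (Int.ofNat_le.mpr h)
  by_cases hl : pvCnt u 30 < pvCnt v 30
  · rw [if_pos hl]
    have hnc : ¬ (pvCnt v 30 ≤ pvCnt u 30 ∧
        ∀ i < pvCnt v 30, (pvBits u 30).getD i 0 ≤ (pvBits v 30).getD i 0) := by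
      rintro ⟨h1, _⟩; omega
    rw [decide_eq_false hnc]
  · rw [if_neg hl]
    have h1 : pvCnt v 30 ≤ pvCnt u 30 := by omega
    refine if_congr ?_ rfl rfl
    simp only [Bool.and_eq_true, decide_eq_true_eq]
    constructor
    · rintro ⟨hp, hq⟩
      exact ⟨⟨h1, hiff.mp hp⟩, hq⟩
    · rintro ⟨⟨_, hp⟩, hq⟩
      exact ⟨hiff.mpr hp, hq⟩

-- B's result as a decided proposition
lemma solveB_eq (u v : Int) :
    solve_alt u v =
      if (pvOK u v 30 && decide (u ≤ v)) = true
      then "YES" else "NO" := by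
  have h30 : (30 : Int) = ((30 : ℕ) : Int) := by norm_num
  unfold solve_alt pvOK
  rw [h30, foldB]

-- the two conditions agree
lemma cond_iff (u v : Int) :
    (pvCnt v 30 ≤ pvCnt u 30 ∧
      ∀ i < pvCnt v 30, (pvBits u 30).getD i 0 ≤ (pvBits v 30).getD i 0)
    ↔ ∀ m < (30:ℕ), pvCnt v (m+1) ≤ pvCnt u (m+1) := by
  rw [← maj u v 30]
  constructor
  · intro h m hm
    exact h (m+1) (by omega)
  · intro h m hm
    cases m with
    | zero => simp [pvCnt, pvBits]
    | succ k => exact h k (by omega)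

-- ===== VERDICT (by name: the statement is the Claim_ definition above) =====
theorem solve_spec : Claim_equal_solve := by
  intro u v _
  unfold Spec_solve
  rw [solveA_eq, solveB_eq]
  unfold pvOK
  rw [decide_eq_decide.mpr (cond_iff u v)]
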